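-- pv_equiv track=rewrite | github.com/Bhargavacharanreddy/RAG_Application | step_1_files_chunking_preprocessing_part/document_chunker.py | chunk_documents
-- ===== SOURCE A (Python) =====
-- def chunk_documents(documents, chunk_size=512):
--     chunked_docs = []
--     for doc in documents:
--         words = doc['content'].split()
--         for i in range(0, len(words), chunk_size):
--             chunk = ' '.join(words[i:i + chunk_size])
--             chunked_docs.append({'filename': doc['filename'], 'content': chunk})
--     return chunked_docs
-- ===== SOURCE B (Python) =====
-- def chunk_documents(documents, chunk_size=512):
--     # Buffer-based single pass: collect words per document and flush every
--     # time the buffer reaches chunk_size; a non-positive chunk size yields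
--     # no chunks.
--     if chunk_size <= 0:
--         return []
--     chunked_docs = []
--     for doc in documents:
--         filename = doc['filename']
--         buf = []
--         for word in doc['content'].split():
--             buf.append(word)
--             if len(buf) == chunk_size:
--                 chunked_docs.append({'filename': filename, 'content': ' '.join(buf)})
--                 buf = []
--         if buf:
--             chunked_docs.append({'filename': filename, 'content': ' '.join(buf)})
--     return chunked_docs
-- ===== Notes on version B (the rewrite author's own statement) =====
-- stated objective: alternative
-- what changed: Replaces the index-stepped range(0, len(words), chunk_size) slicing by a single buffered pass over the words that emits a chunk each time the buffer reaches chunk_size and emits the final partial buffer at the end of each document.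
-- outside the precondition, e.g. on chunk_documents([{'content': ''}], 5): A returns [], B raises KeyError
import Mathlib
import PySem

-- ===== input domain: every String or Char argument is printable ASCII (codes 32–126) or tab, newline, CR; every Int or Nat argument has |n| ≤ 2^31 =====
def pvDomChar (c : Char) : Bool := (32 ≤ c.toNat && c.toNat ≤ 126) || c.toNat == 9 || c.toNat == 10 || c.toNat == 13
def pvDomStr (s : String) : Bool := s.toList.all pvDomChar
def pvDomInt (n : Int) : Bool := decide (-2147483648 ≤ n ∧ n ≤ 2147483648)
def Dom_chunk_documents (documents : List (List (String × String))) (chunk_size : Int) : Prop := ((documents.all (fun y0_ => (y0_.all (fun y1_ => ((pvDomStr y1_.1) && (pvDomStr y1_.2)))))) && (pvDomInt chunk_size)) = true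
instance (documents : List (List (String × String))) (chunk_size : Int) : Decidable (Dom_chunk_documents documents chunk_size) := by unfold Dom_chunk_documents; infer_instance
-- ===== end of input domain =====

-- B replaces index-stepped range slicing by a single buffered pass per document
-- (flush when the buffer reaches chunk_size); alternative decomposition, same cost.


-- ===== PORT A =====
-- doc['content'] / doc['filename'] are ported as Dict.getD with a "" default;
-- Pre_chunk_documents guarantees both keys are present, so the lookup is exact there.
def chunk_documents (documents : List (List (String × String))) (chunk_size : Int) : List (List (String × String)) :=
  documents.foldl (fun chunked_docs doc =>
    let d := PySem.Dict.ofList doc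
    let words := PySem.Str.split₀ (d.getD "content" "")
    (PySem.List.pyRange 0 (words.length : Int) chunk_size).foldl (fun acc i =>
      let chunk := PySem.Str.join " " (PySem.List.slice words (some i) (some (i + chunk_size)))
      acc ++ [[("filename", d.getD "filename" ""), ("content", chunk)]]) chunked_docs) []

-- ===== PORT B =====
def chunk_documents_alt (documents : List (List (String × String))) (chunk_size : Int) : List (List (String × String)) :=
  if chunk_size ≤ 0 then []
  else
    documents.foldl (fun chunked_docs doc =>
      let d := PySem.Dict.ofList doc
      let filename := d.getD "filename" ""
      let st := (PySem.Str.split₀ (d.getD "content" "")).foldl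
        (fun (st : List (List (String × String)) × List String) word =>
          let buf := st.2 ++ [word]
          if (buf.length : Int) = chunk_size then
            (st.1 ++ [[("filename", filename), ("content", PySem.Str.join " " buf)]], [])
          else (st.1, buf)) (chunked_docs, [])
      if st.2 ≠ [] then st.1 ++ [[("filename", filename), ("content", PySem.Str.join " " st.2)]]
      else st.1) []

-- ===== PRECONDITION & SPEC =====
-- Pre_ excludes the inputs on which the Python A raises: a document without a 'content'
-- key (KeyError), chunk_size == 0 while some document is present (range(..., 0) raises
-- ValueError), and, under a positive chunk_size, a document without a 'filename' key --
-- there A raises KeyError once the document has any word, and returns on a wordless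
-- document only because the lookup is never reached, while B's up-front doc['filename']
-- raises KeyError.
def Pre_chunk_documents (documents : List (List (String × String))) (chunk_size : Int) : Prop :=
  (∀ doc ∈ documents, (PySem.Dict.ofList doc).contains "content" = true) ∧
  (0 < chunk_size → ∀ doc ∈ documents, (PySem.Dict.ofList doc).contains "filename" = true) ∧
  (chunk_size ≠ 0 ∨ documents = [])
instance (documents : List (List (String × String))) (chunk_size : Int) : Decidable (Pre_chunk_documents documents chunk_size) := by unfold Pre_chunk_documents; infer_instance

def pvWitness_chunk_documents : (List (List (String × String))) × Int :=
  ([[("filename", "a.txt"), ("content", "one two three")]], 2)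

def Spec_chunk_documents (documents : List (List (String × String))) (chunk_size : Int) (out : List (List (String × String))) : Prop := out = chunk_documents_alt documents chunk_size
instance (documents : List (List (String × String))) (chunk_size : Int) (out : List (List (String × String))) : Decidable (Spec_chunk_documents documents chunk_size out) := by unfold Spec_chunk_documents; infer_instance

-- ===== CLAIM (what is proved, stated in full; the proofs are below) =====
def Claim_equal_chunk_documents : Prop := ∀ (documents : List (List (String × String))) (chunk_size : Int), Dom_chunk_documents documents chunk_size → Pre_chunk_documents documents chunk_size → Spec_chunk_documents documents chunk_size (chunk_documents documents chunk_size)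


-- ===== LEMMAS AND PROOFS =====

-- the common abstraction: the words of a document, grouped into chunks of k+1
def chunkWords (k : Nat) : List String → List (List String)
  | [] => []
  | w :: ws => (w :: ws.take k) :: chunkWords k (ws.drop k)
termination_by ws => ws.length
decreasing_by simp

lemma chunkWords_nil (k : Nat) : chunkWords k [] = [] := by simp [chunkWords]

lemma chunkWords_cons (k : Nat) (w : String) (ws : List String) :
    chunkWords k (w :: ws) = (w :: ws.take k) :: chunkWords k (ws.drop k) := by
  simp [chunkWords]

lemma chunkWords_eq_cons (k : Nat) (xs : List String) (h : xs ≠ []) :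
    chunkWords k xs = xs.take (k + 1) :: chunkWords k (xs.drop (k + 1)) := by
  match xs with
  | [] => exact absurd rfl h
  | w :: ws => rw [chunkWords_cons]; simp

lemma chunkWords_short (k : Nat) (xs : List String) (h : xs.length ≤ k + 1) (hne : xs ≠ []) :
    chunkWords k xs = [xs] := by
  rw [chunkWords_eq_cons k xs hne, List.take_of_length_le h, List.drop_eq_nil_of_le h,
      chunkWords_nil]

lemma pyRange_pos_nil (b s : Int) (hb : 0 ≤ b) (hs : s ≤ 0) :
    PySem.List.pyRange 0 b s = [] := by
  simp only [PySem.List.pyRange]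
  split_ifs with h1 h2 h3 <;> simp_all <;> omega

lemma pyRange_pos_nil' (a b s : Int) (hs : 0 < s) (h : b ≤ a) :
    PySem.List.pyRange a b s = [] := by
  rw [PySem.List.pyRange_of_pos a b hs, if_neg (by omega)]
  simp

lemma pyRange_pos_cons (a b s : Int) (hs : 0 < s) (h : a < b) :
    PySem.List.pyRange a b s = a :: PySem.List.pyRange (a + s) b s := by
  rw [PySem.List.pyRange_of_pos a b hs, PySem.List.pyRange_of_pos (a + s) b hs]
  have hcount : ((b - a + s - 1) / s) = ((b - (a + s) + s - 1) / s) + 1 := by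
    have : b - a + s - 1 = (b - (a + s) + s - 1) + 1 * s := by ring
    rw [this, Int.add_mul_ediv_right _ _ (by omega : s ≠ 0)]
  by_cases h2 : a + s < b
  · rw [if_pos h, if_pos h2]
    have h1 : 0 ≤ (b - (a + s) + s - 1) / s := by
      apply Int.ediv_nonneg <;> omega
    have hn : ((b - a + s - 1) / s).toNat = ((b - (a + s) + s - 1) / s).toNat + 1 := by omega
    rw [hn, List.range_succ_eq_map]
    simp only [List.map_cons, List.map_map]
    congr 1
    · simp
    · apply List.map_congr_left; intro x _; simp [Function.comp]; ring
  · rw [if_pos h, if_neg h2]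
    have hlo : 1 ≤ (b - a + s - 1) / s := by
      rw [Int.le_ediv_iff_mul_le hs]; omega
    have hhi : (b - a + s - 1) / s < 2 := by
      rw [Int.ediv_lt_iff_lt_mul hs]; omega
    have hn : ((b - a + s - 1) / s).toNat = 1 := by omega
    rw [hn]
    simp

lemma pyRange_pos_shift (a b s : Int) (hs : 0 < s) :
    PySem.List.pyRange (a + s) b s = (PySem.List.pyRange a (b - s) s).map (· + s) := by
  rw [PySem.List.pyRange_of_pos (a + s) b hs, PySem.List.pyRange_of_pos a (b - s) hs]
  have hcond : (a + s < b) ↔ (a < b - s) := by omega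
  have harg : b - (a + s) + s - 1 = b - s - a + s - 1 := by ring
  rw [harg]
  simp only [hcond, List.map_map]
  apply List.map_congr_left; intro x _; simp [Function.comp]; ring

lemma mem_pyRange_pos_nonneg (b s i : Int) (hs : 0 < s) (hi : i ∈ PySem.List.pyRange 0 b s) :
    0 ≤ i := by
  rw [PySem.List.pyRange_of_pos 0 b hs] at hi
  simp at hi
  rcases hi with ⟨j, _, rfl⟩
  positivity

-- A's slice-by-range loop produces exactly the chunks of chunkWords
lemma slice_map_eq_chunkWords_aux (k : Nat) :
    ∀ (n : Nat) (words : List String), words.length ≤ n →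
    (PySem.List.pyRange 0 (words.length : Int) ((k : Int) + 1)).map
        (fun i => PySem.List.slice words (some i) (some (i + ((k : Int) + 1))))
      = chunkWords k words := by
  intro n
  induction n with
  | zero =>
      intro words hw
      have : words = [] := by
        cases words with
        | nil => rfl
        | cons w ws => simp at hw
      subst this
      simp only [List.length_nil, Nat.cast_zero, chunkWords_nil]
      rw [pyRange_pos_nil' 0 0 ((k:Int)+1) (by omega) le_rfl]
      simp
  | succ n ih =>
      intro words hw
      cases words with
      | nil =>
          simp only [List.length_nil, Nat.cast_zero, chunkWords_nil]
          rw [pyRange_pos_nil' 0 0 ((k:Int)+1) (by omega) le_rfl]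
          simp
      | cons w ws =>
          have hs : (0:Int) < (k : Int) + 1 := by omega
          have hlen : (0:Int) < ((w :: ws).length : Int) := by simp
          rw [pyRange_pos_cons 0 _ _ hs hlen, pyRange_pos_shift 0 _ _ hs,
              chunkWords_cons]
          simp only [List.map_cons, List.map_map]
          congr 1
          · -- head chunk: words[0 : k+1] = w :: ws.take k
            rw [PySem.List.slice_toNat _ (by omega) (by omega)]
            have e1 : ((0:Int) + ((k:Int)+1)).toNat - (0:Int).toNat = k + 1 := by omega
            rw [e1]
            simp
          · -- tail chunks act on the dropped list
            by_cases hbig : k + 1 ≤ (w :: ws).length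
            · have hmlen : ((ws.drop k).length : Int)
                  = ((w :: ws).length : Int) - ((k:Int)+1) := by
                simp at hbig ⊢; omega
              have hle : (ws.drop k).length ≤ n := by
                have := List.length_drop (l := ws) (i := k)
                simp at hw ⊢; omega
              rw [← hmlen, ← ih (ws.drop k) hle]
              apply List.map_congr_left
              intro i hi
              have hi0 : 0 ≤ i := mem_pyRange_pos_nonneg _ _ i hs hi
              simp only [Function.comp]
              rw [PySem.List.slice_toNat _ (by omega) (by omega),
                  PySem.List.slice_toNat _ (by omega) (by omega)]
              have hdrop : (w :: ws).drop (k + 1) = ws.drop k := by simp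
              have e1 : (i + ((k:Int)+1)).toNat = i.toNat + (k + 1) := by omega
              have e2 : (i + ((k:Int)+1) + ((k:Int)+1)).toNat - (i + ((k:Int)+1)).toNat
                  = k + 1 := by omega
              have e3 : (i + ((k:Int)+1)).toNat - i.toNat = k + 1 := by omega
              rw [e2, e3, e1, ← hdrop, List.drop_drop, Nat.add_comm (k+1) i.toNat]
            · have hm : ws.drop k = [] := by
                apply List.drop_eq_nil_of_le
                simp at hbig; omega
              rw [hm, chunkWords_nil,
                  pyRange_pos_nil' 0 _ _ hs (by simp at hbig ⊢; omega)]
              simp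

lemma slice_map_eq_chunkWords (k : Nat) (words : List String) :
    (PySem.List.pyRange 0 (words.length : Int) ((k : Int) + 1)).map
        (fun i => PySem.List.slice words (some i) (some (i + ((k : Int) + 1))))
      = chunkWords k words :=
  slice_map_eq_chunkWords_aux k words.length words le_rfl

-- B's buffered loop produces the chunks of chunkWords (with the leftover flushed)
lemma bloop_eq_chunkWords (k : Nat) (g : List String → List (String × String)) :
    ∀ (words : List String) (c : List (List (String × String))) (buf : List String),
      buf.length ≤ k →
      (let st := words.foldl
          (fun (st : List (List (String × String)) × List String) word =>
            let buf := st.2 ++ [word]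
            if (buf.length : Int) = ((k : Int) + 1) then (st.1 ++ [g buf], [])
            else (st.1, buf)) (c, buf)
       if st.2 ≠ [] then st.1 ++ [g st.2] else st.1)
      = c ++ (chunkWords k (buf ++ words)).map g := by
  intro words
  induction words with
  | nil =>
      intro c buf hbuf
      simp only [List.foldl_nil, List.append_nil]
      by_cases h : buf = []
      · subst h; simp [chunkWords_nil]
      · rw [chunkWords_short k buf (by omega) h]
        simp [h]
  | cons w ws ih =>
      intro c buf hbuf
      simp only [List.foldl_cons]
      by_cases h : ((buf ++ [w]).length : Int) = ((k : Int) + 1)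
      · rw [if_pos h]
        have hlen : (buf ++ [w]).length = k + 1 := by
          simp at h ⊢; omega
        rw [ih (c ++ [g (buf ++ [w])]) [] (by simp)]
        rw [List.nil_append, List.append_assoc]
        congr 1
        have hxs : buf ++ w :: ws = (buf ++ [w]) ++ ws := by simp
        rw [hxs, chunkWords_eq_cons k (buf ++ [w] ++ ws) (by simp),
            List.take_left' hlen, List.drop_left' hlen]
        simp
      · rw [if_neg h]
        rw [ih c (buf ++ [w]) (by simp at h ⊢; omega)]
        congr 2
        simp

-- per-document agreement of the two loop bodies, for a positive chunk size
lemma perDoc (k : Nat) (doc : List (String × String)) (acc : List (List (String × String))) :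
    (let d := PySem.Dict.ofList doc
     let words := PySem.Str.split₀ (d.getD "content" "")
     (PySem.List.pyRange 0 (words.length : Int) ((k : Int) + 1)).foldl (fun acc i =>
       let chunk := PySem.Str.join " " (PySem.List.slice words (some i) (some (i + ((k : Int) + 1))))
       acc ++ [[("filename", d.getD "filename" ""), ("content", chunk)]]) acc)
    = (let d := PySem.Dict.ofList doc
       let filename := d.getD "filename" ""
       let st := (PySem.Str.split₀ (d.getD "content" "")).foldl
         (fun (st : List (List (String × String)) × List String) word =>
           let buf := st.2 ++ [word]
           if (buf.length : Int) = ((k : Int) + 1) then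
             (st.1 ++ [[("filename", filename), ("content", PySem.Str.join " " buf)]], [])
           else (st.1, buf)) (acc, [])
       if st.2 ≠ [] then st.1 ++ [[("filename", filename), ("content", PySem.Str.join " " st.2)]]
       else st.1) := by
  simp only []
  rw [PySem.List.foldl_append_singleton_eq_map]
  rw [bloop_eq_chunkWords k
      (fun buf => [("filename", (PySem.Dict.ofList doc).getD "filename" ""),
                   ("content", PySem.Str.join " " buf)])
      (PySem.Str.split₀ ((PySem.Dict.ofList doc).getD "content" "")) acc [] (by simp)]
  rw [← slice_map_eq_chunkWords k, List.map_map, List.nil_append]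
  rfl

-- ===== VERDICT (by name: the statement is the Claim_ definition above) =====
theorem chunk_documents_spec : Claim_equal_chunk_documents := by
  intro documents chunk_size _hdom hpre
  unfold Spec_chunk_documents chunk_documents chunk_documents_alt
  by_cases hcs : chunk_size ≤ 0
  · rw [if_pos hcs]
    -- every inner range is empty, so A's fold keeps its accumulator
    trans (documents.foldl
        (fun (acc : List (List (String × String))) (_ : List (String × String)) => acc) [])
    · apply PySem.List.foldl_congr_mem
      intro acc doc _
      simp only []
      rw [pyRange_pos_nil _ _ (by positivity) hcs]
      rfl
    · simp
  · rw [if_neg hcs]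
    rw [not_le] at hcs
    obtain ⟨k, hk⟩ : ∃ k : Nat, chunk_size = (k : Int) + 1 :=
      ⟨(chunk_size - 1).toNat, by omega⟩
    subst hk
    apply PySem.List.foldl_congr_mem
    intro acc doc _
    exact perDoc k doc acc
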